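-- pv_equiv track=rewrite | github.com/RdgFerreira/poc | data-strucutres-and-libraries/problems.py | guess_data_structure
-- ===== SOURCE A (Python) =====
-- import heapq
--
-- def guess_data_structure(operations):
--     stack = []
--     queue = []
--     priority_queue = []
--     is_stack = True
--     is_queue = True
--     is_priority_queue = True
--
--     for op in operations:
--         if op[0] == 1:
--             x = op[1]
--             stack.append(x)
--             queue.append(x)
--             heapq.heappush(priority_queue, -x)
--         elif op[0] == 2:
--             x = op[1]
--             if is_stack:
--                 if stack and stack[-1] == x:
--                     stack.pop()
--                 else:
--                     is_stack = False
--             if is_queue: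
--                 if queue and queue[0] == x:
--                     queue.pop(0)
--                 else:
--                     is_queue = False
--             if is_priority_queue:
--                 if priority_queue and -heapq.heappop(priority_queue) == x:
--                     pass
--                 else:
--                     is_priority_queue = False
--
--     if is_stack and not is_queue and not is_priority_queue:
--         return "stack"
--     elif not is_stack and is_queue and not is_priority_queue:
--         return "queue"
--     elif not is_stack and not is_queue and is_priority_queue:
--         return "priority queue"
--     elif not is_stack and not is_queue and not is_priority_queue:
--         return "impossible"
--     else:
--         return "not sure"
-- ===== SOURCE B (Python) =====
-- import heapq
--
-- def _matches(operations, kind):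
--     # kind: 0 = stack, 1 = queue, 2 = priority queue
--     c = []
--     for op in operations:
--         if op[0] == 1:
--             if kind == 2:
--                 heapq.heappush(c, -op[1])
--             else:
--                 c.append(op[1])
--         elif op[0] == 2:
--             x = op[1]
--             if not c:
--                 return False
--             if kind == 0:
--                 if c.pop() != x:
--                     return False
--             elif kind == 1:
--                 if c.pop(0) != x:
--                     return False
--             else:
--                 if -heapq.heappop(c) != x:
--                     return False
--     return True
--
-- def guess_data_structure(operations):
--     flags = [_matches(operations, k) for k in range(3)]
--     names = ["stack", "queue", "priority queue"]
--     if sum(flags) == 0: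
--         return "impossible"
--     if sum(flags) == 1:
--         return names[flags.index(True)]
--     return "not sure"
-- ===== Notes on version B (the rewrite author's own statement) =====
-- stated objective: alternative
-- what changed: Replaces the single interleaved flag-driven loop over three containers with three independent hypothesis-checking passes (one per container, early-returning on the first mismatch) combined by a count/index decision instead of the eight-way flag table.
import Mathlib
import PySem

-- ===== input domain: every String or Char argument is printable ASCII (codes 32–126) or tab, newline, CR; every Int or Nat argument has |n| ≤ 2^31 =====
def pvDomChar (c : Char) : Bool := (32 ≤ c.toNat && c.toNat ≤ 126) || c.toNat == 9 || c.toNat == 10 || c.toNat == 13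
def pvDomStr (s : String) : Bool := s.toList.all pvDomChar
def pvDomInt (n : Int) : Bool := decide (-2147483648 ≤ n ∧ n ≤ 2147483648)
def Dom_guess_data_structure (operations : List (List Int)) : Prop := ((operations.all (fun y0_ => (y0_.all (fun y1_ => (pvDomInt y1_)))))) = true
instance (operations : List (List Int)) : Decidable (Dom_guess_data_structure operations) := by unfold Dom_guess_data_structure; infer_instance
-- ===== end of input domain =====

-- B is an alternative decomposition of A (three independent passes instead of one interleaved
-- flag-driven loop); equivalence is proved on inputs where A's indexing does not raise.

-- ===== PORT A =====
-- heapq is observed only through heappush/heappop (min-first); it is modelled exactly as a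
-- sorted multiset: heappush = sorted insert, heappop = take the head (the minimum).
def pvHeappush (h : List Int) (x : Int) : List Int :=
  match h with
  | [] => [x]
  | y :: ys => if x ≤ y then x :: y :: ys else y :: pvHeappush ys x

-- A's loop body updates (stack, is_stack), (queue, is_queue), (priority_queue, is_priority_queue)
-- sequentially and independently; the state is grouped per structure, updates are A's, verbatim.
def pvStepS (st : List Int × Bool) (op : List Int) : List Int × Bool :=
  let o0 := (PySem.List.pyGet? op 0).getD 0
  let x := (PySem.List.pyGet? op 1).getD 0
  if o0 = 1 then (st.1 ++ [x], st.2)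
  else if o0 = 2 then
    if st.2 then
      match st.1.getLast? with
      | some y => if y = x then (st.1.dropLast, true) else (st.1, false)
      | none => (st.1, false)
    else (st.1, false)
  else st

def pvStepQ (st : List Int × Bool) (op : List Int) : List Int × Bool :=
  let o0 := (PySem.List.pyGet? op 0).getD 0
  let x := (PySem.List.pyGet? op 1).getD 0
  if o0 = 1 then (st.1 ++ [x], st.2)
  else if o0 = 2 then
    if st.2 then
      match st.1 with
      | y :: ys => if y = x then (ys, true) else (st.1, false)
      | [] => (st.1, false)
    else (st.1, false)
  else st

def pvStepP (st : List Int × Bool) (op : List Int) : List Int × Bool :=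
  let o0 := (PySem.List.pyGet? op 0).getD 0
  let x := (PySem.List.pyGet? op 1).getD 0
  if o0 = 1 then (pvHeappush st.1 (-x), st.2)
  else if o0 = 2 then
    if st.2 then
      match st.1 with
      | y :: ys => if -y = x then (ys, true) else (ys, false)  -- heappop happens inside the test
      | [] => (st.1, false)
    else (st.1, false)
  else st

def pvStepA (st : (List Int × Bool) × (List Int × Bool) × (List Int × Bool)) (op : List Int) :
    (List Int × Bool) × (List Int × Bool) × (List Int × Bool) :=
  (pvStepS st.1 op, pvStepQ st.2.1 op, pvStepP st.2.2 op)

def guess_data_structure (operations : List (List Int)) : String :=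
  let st := operations.foldl pvStepA (([], true), ([], true), ([], true))
  let s := st.1.2
  let q := st.2.1.2
  let p := st.2.2.2
  if s && !q && !p then "stack"
  else if !s && q && !p then "queue"
  else if !s && !q && p then "priority queue"
  else if !s && !q && !p then "impossible"
  else "not sure"

-- ===== PORT B =====
-- three independent hypothesis checks, each early-returning false on the first mismatch
def pvCheckStack (c : List Int) : List (List Int) → Bool
  | [] => true
  | op :: ops =>
    let o0 := (PySem.List.pyGet? op 0).getD 0
    let x := (PySem.List.pyGet? op 1).getD 0
    if o0 = 1 then pvCheckStack (c ++ [x]) ops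
    else if o0 = 2 then
      match c.getLast? with
      | some y => if y = x then pvCheckStack c.dropLast ops else false
      | none => false
    else pvCheckStack c ops

def pvCheckQueue (c : List Int) : List (List Int) → Bool
  | [] => true
  | op :: ops =>
    let o0 := (PySem.List.pyGet? op 0).getD 0
    let x := (PySem.List.pyGet? op 1).getD 0
    if o0 = 1 then pvCheckQueue (c ++ [x]) ops
    else if o0 = 2 then
      match c with
      | y :: ys => if y = x then pvCheckQueue ys ops else false
      | [] => false
    else pvCheckQueue c ops

def pvCheckPQ (c : List Int) : List (List Int) → Bool
  | [] => true
  | op :: ops =>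
    let o0 := (PySem.List.pyGet? op 0).getD 0
    let x := (PySem.List.pyGet? op 1).getD 0
    if o0 = 1 then pvCheckPQ (pvHeappush c (-x)) ops
    else if o0 = 2 then
      match c with
      | y :: ys => if -y = x then pvCheckPQ ys ops else false
      | [] => false
    else pvCheckPQ c ops

def guess_data_structure_alt (operations : List (List Int)) : String :=
  let flags := [pvCheckStack [] operations, pvCheckQueue [] operations, pvCheckPQ [] operations]
  let names := ["stack", "queue", "priority queue"]
  let total := flags.count true
  if total = 0 then "impossible"
  else if total = 1 then names.getD (flags.idxOf true) "not sure"
  else "not sure"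

-- ===== PRECONDITION & SPEC =====
-- Pre_ excludes exactly the inputs on which A raises IndexError: an empty operation (op[0]),
-- or an op starting with 1 or 2 but lacking op[1].
def Pre_guess_data_structure (operations : List (List Int)) : Prop :=
  ∀ op ∈ operations, 1 ≤ op.length ∧
    (((PySem.List.pyGet? op 0).getD 0 = 1 ∨ (PySem.List.pyGet? op 0).getD 0 = 2) → 2 ≤ op.length)
instance (operations : List (List Int)) : Decidable (Pre_guess_data_structure operations) := by
  unfold Pre_guess_data_structure; infer_instance
def pvWitness_guess_data_structure : List (List Int) := [[1, 5], [1, 2], [2, 5], [2, 2]]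

def Spec_guess_data_structure (operations : List (List Int)) (out : String) : Prop := out = guess_data_structure_alt operations
instance (operations : List (List Int)) (out : String) : Decidable (Spec_guess_data_structure operations out) := by unfold Spec_guess_data_structure; infer_instance

-- ===== CLAIM (what is proved, stated in full; the proofs are below) =====
def Claim_equal_guess_data_structure : Prop := ∀ (operations : List (List Int)), Dom_guess_data_structure operations → Pre_guess_data_structure operations → Spec_guess_data_structure operations (guess_data_structure operations)

-- ===== LEMMAS AND PROOFS =====

lemma pv_foldl_prod (ops : List (List Int)) :
    ∀ a b c, ops.foldl pvStepA (a, b, c) =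
      (ops.foldl pvStepS a, ops.foldl pvStepQ b, ops.foldl pvStepP c) := by
  induction ops with
  | nil => intro a b c; rfl
  | cons op ops ih => intro a b c; simp [List.foldl_cons, pvStepA, ih]

lemma pv_flag_stack (ops : List (List Int)) :
    ∀ c s, (ops.foldl pvStepS (c, s)).2 = (s && pvCheckStack c ops) := by
  induction ops with
  | nil => intro c s; cases s <;> simp [pvCheckStack]
  | cons op ops ih =>
    intro c s
    simp only [List.foldl_cons, pvStepS, pvCheckStack]
    cases s
    · split_ifs <;> (try split) <;> (try split_ifs) <;> simp_all [ih]
    · split_ifs <;> (try split) <;> (try split_ifs) <;> simp_all [ih]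

lemma pv_flag_queue (ops : List (List Int)) :
    ∀ c q, (ops.foldl pvStepQ (c, q)).2 = (q && pvCheckQueue c ops) := by
  induction ops with
  | nil => intro c q; cases q <;> simp [pvCheckQueue]
  | cons op ops ih =>
    intro c q
    simp only [List.foldl_cons, pvStepQ, pvCheckQueue]
    cases q
    · split_ifs <;> (try split) <;> (try split_ifs) <;> simp_all [ih]
    · split_ifs <;> (try split) <;> (try split_ifs) <;> simp_all [ih]

lemma pv_flag_pq (ops : List (List Int)) :
    ∀ c p, (ops.foldl pvStepP (c, p)).2 = (p && pvCheckPQ c ops) := by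
  induction ops with
  | nil => intro c p; cases p <;> simp [pvCheckPQ]
  | cons op ops ih =>
    intro c p
    simp only [List.foldl_cons, pvStepP, pvCheckPQ]
    cases p
    · split_ifs <;> (try split) <;> (try split_ifs) <;> simp_all [ih]
    · split_ifs <;> (try split) <;> (try split_ifs) <;> simp_all [ih]

-- ===== VERDICT (by name: the statement is the Claim_ definition above) =====
theorem guess_data_structure_spec : Claim_equal_guess_data_structure := by
  intro ops _ _
  unfold Spec_guess_data_structure guess_data_structure guess_data_structure_alt
  simp only [pv_foldl_prod, pv_flag_stack, pv_flag_queue, pv_flag_pq, Bool.true_and]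
  cases pvCheckStack [] ops <;> cases pvCheckQueue [] ops <;> cases pvCheckPQ [] ops <;> rfl
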